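-- pv_equiv track=rewrite | github.com/teddy4445/dna_property_finder | main.py | break_counts_per_size
-- ===== SOURCE A (Python) =====
-- def break_counts_per_size(counts: dict):
--     sizes = {}
--     counts_new_scores = {}
--     for key, value in counts.items():
--         size = len(key)
--         if size not in sizes:
--             sizes[size] = {}
--         sizes[size][key] = value
--         counts_new_scores[key] = value * size
--     return sizes, counts_new_scores
-- ===== SOURCE B (Python) =====
-- def break_counts_per_size(counts: dict):
--     counts_new_scores = {k: v * len(k) for k, v in counts.items()}
--     lengths = dict.fromkeys(len(k) for k in counts)
--     sizes = {L: {k: v for k, v in counts.items() if len(k) == L} for L in lengths}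
--     return sizes, counts_new_scores
-- ===== Notes on version B (the rewrite author's own statement) =====
-- stated objective: alternative
-- what changed: the single incremental pass that grows a nested dict entry by entry is replaced by a scores dict-comprehension plus a first-occurrence list of key lengths with one filtering comprehension per length
import Mathlib
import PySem

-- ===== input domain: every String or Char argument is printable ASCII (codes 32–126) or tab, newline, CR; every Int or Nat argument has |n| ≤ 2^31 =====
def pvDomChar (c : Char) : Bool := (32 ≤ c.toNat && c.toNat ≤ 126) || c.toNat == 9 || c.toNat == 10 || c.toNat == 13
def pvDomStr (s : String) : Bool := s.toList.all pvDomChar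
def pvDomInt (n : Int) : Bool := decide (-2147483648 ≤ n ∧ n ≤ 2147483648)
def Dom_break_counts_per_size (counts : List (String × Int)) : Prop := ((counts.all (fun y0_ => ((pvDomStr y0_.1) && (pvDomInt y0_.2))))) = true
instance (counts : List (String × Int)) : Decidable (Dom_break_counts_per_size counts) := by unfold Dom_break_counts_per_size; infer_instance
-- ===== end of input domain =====

-- B replaces A's single incremental pass building a nested dict with a scores map plus a
-- first-occurrence list of key lengths and one filtering pass per length (alternative decomposition).


-- ===== PORT A =====
def break_counts_per_size (counts : List (String × Int)) : (List (Int × List (String × Int))) × (List (String × Int)) :=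
  let st := counts.foldl
    (fun (st : PySem.Dict Int (PySem.Dict String Int) × PySem.Dict String Int) kv =>
      let size := PySem.Str.len kv.1
      let sizes := if st.1.contains size then st.1 else st.1.insert size PySem.Dict.empty
      (sizes.modify size PySem.Dict.empty (fun d => d.insert kv.1 kv.2),
       st.2.insert kv.1 (kv.2 * size)))
    (PySem.Dict.empty, PySem.Dict.empty)
  (st.1.items.map (fun q => (q.1, q.2.items)), st.2.items)

-- ===== PORT B =====
def break_counts_per_size_alt (counts : List (String × Int)) : (List (Int × List (String × Int))) × (List (String × Int)) :=
  let counts_new_scores := counts.map (fun kv => (kv.1, kv.2 * PySem.Str.len kv.1))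
  let lengths := PySem.List.dedup (counts.map (fun kv => PySem.Str.len kv.1))
  let sizes := lengths.map (fun L => (L, counts.filter (fun kv => PySem.Str.len kv.1 == L)))
  (sizes, counts_new_scores)

-- ===== PRECONDITION & SPEC =====
-- counts is a Python dict, whose keys are necessarily distinct: Pre_ only excludes association
-- lists with duplicate keys, which correspond to no dict input of A.
def Pre_break_counts_per_size (counts : List (String × Int)) : Prop := (counts.map Prod.fst).Nodup
instance (counts : List (String × Int)) : Decidable (Pre_break_counts_per_size counts) := by unfold Pre_break_counts_per_size; infer_instance
def pvWitness_break_counts_per_size : (List (String × Int)) := [("a", 3), ("bb", -1), ("c", 4)]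

def Spec_break_counts_per_size (counts : List (String × Int)) (out : (List (Int × List (String × Int))) × (List (String × Int))) : Prop := out = break_counts_per_size_alt counts
instance (counts : List (String × Int)) (out : (List (Int × List (String × Int))) × (List (String × Int))) : Decidable (Spec_break_counts_per_size counts out) := by unfold Spec_break_counts_per_size; infer_instance

-- ===== CLAIM (what is proved, stated in full; the proofs are below) =====
def Claim_equal_break_counts_per_size : Prop := ∀ (counts : List (String × Int)), Dom_break_counts_per_size counts → Pre_break_counts_per_size counts → Spec_break_counts_per_size counts (break_counts_per_size counts)

-- ===== LEMMAS AND PROOFS =====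

-- A's loop, split into its two independent accumulators.
def pvStepS (s : PySem.Dict Int (PySem.Dict String Int)) (kv : String × Int) : PySem.Dict Int (PySem.Dict String Int) :=
  (if s.contains (PySem.Str.len kv.1) then s else s.insert (PySem.Str.len kv.1) PySem.Dict.empty).modify
    (PySem.Str.len kv.1) PySem.Dict.empty (fun d => d.insert kv.1 kv.2)

def pvStepC (c : PySem.Dict String Int) (kv : String × Int) : PySem.Dict String Int :=
  c.insert kv.1 (kv.2 * PySem.Str.len kv.1)

theorem pv_split (counts : List (String × Int)) :
    break_counts_per_size counts =
      (((counts.foldl pvStepS PySem.Dict.empty).items.map (fun q => (q.1, q.2.items))),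
       (counts.foldl pvStepC PySem.Dict.empty).items) := by
  have h : break_counts_per_size counts =
      (let st := counts.foldl
          (fun (st : PySem.Dict Int (PySem.Dict String Int) × PySem.Dict String Int) kv =>
            (pvStepS st.1 kv, pvStepC st.2 kv)) (PySem.Dict.empty, PySem.Dict.empty)
       (st.1.items.map (fun q => (q.1, q.2.items)), st.2.items)) := rfl
  rw [h]
  rw [PySem.List.foldl_prod_mk (f := pvStepS) (g := pvStepC)]

-- characterisation of A's sizes loop: its items are one group per first-occurring length
theorem pv_sizes_char (l : List (String × Int)) (h : (l.map Prod.fst).Nodup) :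
    (l.foldl pvStepS PySem.Dict.empty).items =
      (PySem.List.dedup (l.map (fun kv => PySem.Str.len kv.1))).map
        (fun L => (L, PySem.Dict.mk (l.filter (fun kv => PySem.Str.len kv.1 == L)))) := by
  induction l using List.reverseRecOn with
  | nil => rfl
  | append_singleton l₀ kv ih =>
    have hn0 : (l₀.map Prod.fst).Nodup := by
      rw [List.map_append] at h; exact h.of_append_left
    have hfresh : kv.1 ∉ l₀.map Prod.fst := by
      rw [List.map_append] at h
      intro hmem
      exact (List.disjoint_of_nodup_append h) hmem (by simp)
    have hS := ih hn0
    have hkeys : (l₀.foldl pvStepS PySem.Dict.empty).keys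
        = PySem.List.dedup (l₀.map (fun kv => PySem.Str.len kv.1)) := by
      simp only [PySem.Dict.keys, hS, List.map_map]
      exact List.map_id _
    have hnodk : (l₀.foldl pvStepS PySem.Dict.empty).keys.Nodup := by
      rw [hkeys]; exact PySem.Set.nodup_ofList _
    rw [List.foldl_append]
    simp only [List.foldl_cons, List.foldl_nil]
    set S := List.foldl pvStepS PySem.Dict.empty l₀ with hSdef
    by_cases hc : PySem.Str.len kv.1 ∈ l₀.map (fun kv => PySem.Str.len kv.1)
    · -- the length already has a group
      have hcon : (l₀.foldl pvStepS PySem.Dict.empty).contains (PySem.Str.len kv.1) = true := by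
        rw [PySem.Dict.contains_iff_mem_keys, hkeys]
        exact (PySem.Set.mem_ofList _ _).mpr hc
      have hmemit : (PySem.Str.len kv.1,
          PySem.Dict.mk (l₀.filter (fun kv' => PySem.Str.len kv'.1 == PySem.Str.len kv.1)))
          ∈ (l₀.foldl pvStepS PySem.Dict.empty).items := by
        rw [hS]
        exact List.mem_map_of_mem ((PySem.Set.mem_ofList _ _).mpr hc)
      have hgetD := PySem.Dict.getD_of_mem_items _ hmemit hnodk PySem.Dict.empty
      have hinner : ∀ L, L = PySem.Str.len kv.1 →
          ((PySem.Dict.mk (l₀.filter (fun kv' => PySem.Str.len kv'.1 == PySem.Str.len kv.1))).insert kv.1 kv.2)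
            = PySem.Dict.mk ((l₀ ++ [kv]).filter (fun kv' => PySem.Str.len kv'.1 == L)) := by
        intro L hL
        subst hL
        apply PySem.Dict.ext
        rw [PySem.Dict.items_insert_of_not_contains]
        · show l₀.filter _ ++ [kv] = _
          rw [List.filter_append]
          simp
        · rw [← Bool.not_eq_true, PySem.Dict.contains_iff_mem_keys]
          intro hmem
          apply hfresh
          simp only [PySem.Dict.keys] at hmem
          rcases List.mem_map.mp hmem with ⟨p, hp, hpe⟩
          exact hpe ▸ List.mem_map_of_mem (List.mem_of_mem_filter hp)
      unfold pvStepS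
      rw [if_pos hcon]
      simp only [PySem.Dict.modify]
      rw [hgetD, PySem.Dict.items_insert_of_contains _ _ hcon, hS, List.map_map]
      have hded : PySem.List.dedup ((l₀ ++ [kv]).map (fun kv => PySem.Str.len kv.1))
          = PySem.List.dedup (l₀.map (fun kv => PySem.Str.len kv.1)) := by
        rw [List.map_append]
        show PySem.Set.ofList (_ ++ [PySem.Str.len kv.1]) = _
        rw [PySem.Set.ofList_append_singleton,
          PySem.Set.add_of_mem ((PySem.Set.mem_ofList _ _).mpr hc)]
        rfl
      rw [hded]
      apply List.map_congr_left
      intro L hL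
      simp only [Function.comp]
      by_cases hLe : L = PySem.Str.len kv.1
      · subst hLe
        rw [if_pos (by simp), hinner _ rfl]
      · rw [if_neg (fun hh => hLe (beq_iff_eq.mp hh))]
        have hpkv : (PySem.Str.len kv.1 == L) = false :=
          beq_eq_false_iff_ne.mpr (fun he => hLe he.symm)
        have : (l₀ ++ [kv]).filter (fun kv' => PySem.Str.len kv'.1 == L)
            = l₀.filter (fun kv' => PySem.Str.len kv'.1 == L) := by
          rw [List.filter_append]
          simp only [List.filter_cons, hpkv, Bool.false_eq_true, if_false, List.filter_nil,
            List.append_nil]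
        rw [this]
    · -- a new length group is appended
      have hcon : (l₀.foldl pvStepS PySem.Dict.empty).contains (PySem.Str.len kv.1) = false := by
        rw [← Bool.not_eq_true, PySem.Dict.contains_iff_mem_keys, hkeys]
        exact fun hmem => hc ((PySem.Set.mem_ofList _ _).mp hmem)
      unfold pvStepS
      rw [hcon]
      simp only [Bool.false_eq_true, if_false, PySem.Dict.modify, PySem.Dict.getD_insert_self,
        PySem.Dict.insert_insert_self]
      rw [PySem.Dict.items_insert_of_not_contains _ _ hcon, hS]
      have hded : PySem.List.dedup ((l₀ ++ [kv]).map (fun kv => PySem.Str.len kv.1))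
          = PySem.List.dedup (l₀.map (fun kv => PySem.Str.len kv.1)) ++ [PySem.Str.len kv.1] := by
        rw [List.map_append]
        show PySem.Set.ofList (_ ++ [PySem.Str.len kv.1]) = _
        rw [PySem.Set.ofList_append_singleton,
          PySem.Set.add_of_not_mem (fun hmem => hc ((PySem.Set.mem_ofList _ _).mp hmem))]
        rfl
      rw [hded, List.map_append]
      congr 1
      · apply List.map_congr_left
        intro L hL
        have hLl : L ∈ l₀.map (fun kv => PySem.Str.len kv.1) := (PySem.Set.mem_ofList _ _).mp hL
        have hLe : L ≠ PySem.Str.len kv.1 := fun he => hc (he ▸ hLl)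
        have hpkv : (PySem.Str.len kv.1 == L) = false :=
          beq_eq_false_iff_ne.mpr (fun he => hLe he.symm)
        have : (l₀ ++ [kv]).filter (fun kv' => PySem.Str.len kv'.1 == L)
            = l₀.filter (fun kv' => PySem.Str.len kv'.1 == L) := by
          rw [List.filter_append]
          simp only [List.filter_cons, hpkv, Bool.false_eq_true, if_false, List.filter_nil,
            List.append_nil]
        rw [this]
      · simp only [List.map_cons, List.map_nil, List.cons.injEq, and_true, Prod.mk.injEq, true_and]
        apply PySem.Dict.ext
        rw [PySem.Dict.items_insert_of_not_contains _ _ (PySem.Dict.contains_empty _)]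
        show [kv] = _
        rw [List.filter_append]
        have hnil : l₀.filter (fun kv' => PySem.Str.len kv'.1 == PySem.Str.len kv.1) = [] := by
          rw [List.filter_eq_nil_iff]
          intro a ha hpa
          exact hc (beq_iff_eq.mp hpa ▸
            List.mem_map_of_mem (f := fun kv => PySem.Str.len kv.1) ha)
        rw [hnil]
        simp

theorem pv_scores_char (l : List (String × Int)) (h : (l.map Prod.fst).Nodup) :
    (l.foldl pvStepC PySem.Dict.empty).items =
      l.map (fun kv => (kv.1, kv.2 * PySem.Str.len kv.1)) := by
  unfold pvStepC
  rw [PySem.Dict.items_foldl_insert_fresh l Prod.fst (fun kv => kv.2 * PySem.Str.len kv.1)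
      PySem.Dict.empty (fun a _ => PySem.Dict.contains_empty _) h]
  rfl

-- ===== VERDICT (by name: the statement is the Claim_ definition above) =====
theorem break_counts_per_size_spec : Claim_equal_break_counts_per_size := by
  intro counts _ hpre
  show _ = _
  rw [pv_split, pv_sizes_char counts hpre, pv_scores_char counts hpre]
  unfold break_counts_per_size_alt
  simp only [List.map_map]
  rfl
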